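-- pv_equiv track=rewrite | github.com/edoardo1710/-ProgrammingLab | Primo semestre/Lezione_3/Esercizio_3.py | word_lenght
-- ===== SOURCE A (Python) =====
-- def word_lenght(phrases):
--     words = {}
--     for word in phrases:
--         if word[0] not in words.keys():
--             words[word[0]] = word
--         elif len(word) > len(words[word[0]]):
--             words[word[0]] = word
--     return words
-- ===== SOURCE B (Python) =====
-- def word_lenght(phrases):
--     groups = {}
--     for word in phrases:
--         groups.setdefault(word[0], []).append(word)
--     return {c: max(ws, key=len) for c, ws in groups.items()}
-- ===== Notes on version B (the rewrite author's own statement) =====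
-- stated objective: alternative
-- what changed: Replaces the online keep-running-best loop with a two-phase pass: group all words by first letter into lists, then take the first longest of each group with max(key=len).
import Mathlib
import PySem

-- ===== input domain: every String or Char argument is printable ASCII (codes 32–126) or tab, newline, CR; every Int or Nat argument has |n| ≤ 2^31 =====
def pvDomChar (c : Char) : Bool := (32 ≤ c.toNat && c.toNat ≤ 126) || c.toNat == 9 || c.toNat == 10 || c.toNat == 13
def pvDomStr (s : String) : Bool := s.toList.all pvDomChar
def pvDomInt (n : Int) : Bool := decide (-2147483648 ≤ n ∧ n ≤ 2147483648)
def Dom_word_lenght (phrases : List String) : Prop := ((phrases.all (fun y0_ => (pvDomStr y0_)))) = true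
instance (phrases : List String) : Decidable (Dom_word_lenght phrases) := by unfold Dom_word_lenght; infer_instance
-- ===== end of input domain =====

-- B replaces A's online keep-running-best loop by a two-phase pass (group words by first
-- letter, then take the first longest of each group); same cost, different decomposition.

-- word[0] as a one-character string; the default ' ' is only reached when word = "", which
-- Pre_word_lenght excludes (Python raises IndexError there).
def pvKey (w : String) : String := String.ofList [PySem.List.pyGetD w.toList 0 ' ']

-- ===== PORT A =====
def pvStepA (words : PySem.Dict String String) (word : String) : PySem.Dict String String :=
  if words.contains (pvKey word) = false then words.insert (pvKey word) word
  else if PySem.Str.len word > PySem.Str.len (words.getD (pvKey word) "") then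
    words.insert (pvKey word) word
  else words

def word_lenght (phrases : List String) : List (String × String) :=
  (phrases.foldl pvStepA PySem.Dict.empty).items

-- ===== PORT B =====
def pvGroupStep (groups : PySem.Dict String (List String)) (word : String) :
    PySem.Dict String (List String) :=
  groups.modify (pvKey word) [] (· ++ [word])

-- max(ws, key=len); the .getD "" default is never reached: every group is nonempty.
def word_lenght_alt (phrases : List String) : List (String × String) :=
  let groups := phrases.foldl pvGroupStep PySem.Dict.empty
  groups.items.map (fun p => (p.1, (PySem.List.max? p.2 PySem.Str.len).getD ""))

-- ===== PRECONDITION & SPEC =====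
-- Pre_ excludes exactly the inputs containing an empty word, on which Python A (and B)
-- raises IndexError at word[0].
def Pre_word_lenght (phrases : List String) : Prop :=
  (phrases.all (fun w => !(w == ""))) = true
instance (phrases : List String) : Decidable (Pre_word_lenght phrases) := by
  unfold Pre_word_lenght; infer_instance

def pvWitness_word_lenght : List String := ["hi", "hat", "by", "ha"]

def Spec_word_lenght (phrases : List String) (out : List (String × String)) : Prop :=
  out = word_lenght_alt phrases
instance (phrases : List String) (out : List (String × String)) :
    Decidable (Spec_word_lenght phrases out) := by unfold Spec_word_lenght; infer_instance

-- ===== CLAIM (what is proved, stated in full; the proofs are below) =====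
def Claim_equal_word_lenght : Prop := ∀ (phrases : List String), Dom_word_lenght phrases →
  Pre_word_lenght phrases → Spec_word_lenght phrases (word_lenght phrases)

-- ===== LEMMAS AND PROOFS =====

-- the option-valued running-max step, exactly the body of PySem.List.max? with key = Str.len
def pvOStep (acc : Option String) (x : String) : Option String :=
  match acc with
  | none => some x
  | some m => if PySem.Str.len m < PySem.Str.len x then some x else some m

theorem pvMax?_eq_foldl (xs : List String) :
    PySem.List.max? xs PySem.Str.len = xs.foldl pvOStep none := by
  unfold PySem.List.max?
  congr 1
  funext acc x
  cases acc <;> rfl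

theorem pvStepA_get? (d : PySem.Dict String String) (w : String) (c : String) :
    (pvStepA d w).get? c =
      if pvKey w == c then pvOStep (d.get? c) w else d.get? c := by
  by_cases hk : pvKey w = c
  · subst hk
    simp only [beq_self_eq_true, if_true]
    unfold pvStepA
    by_cases hc : d.contains (pvKey w) = false
    · rw [if_pos hc, PySem.Dict.get?_insert]
      have : d.get? (pvKey w) = none := (PySem.Dict.get?_eq_none_iff_contains d _).mpr hc
      simp [this, pvOStep]
    · rw [if_neg hc]
      have hc' : d.contains (pvKey w) = true := by
        cases h : d.contains (pvKey w) <;> simp_all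
      obtain ⟨v, hv⟩ : ∃ v, d.get? (pvKey w) = some v := by
        cases h : d.get? (pvKey w) with
        | none => exact absurd ((PySem.Dict.get?_eq_none_iff_contains d _).mp h) (by simp [hc'])
        | some v => exact ⟨v, rfl⟩
      have hgd : d.getD (pvKey w) "" = v := by rw [PySem.Dict.getD_eq_get?_getD, hv]; rfl
      by_cases hlt : PySem.Str.len w > PySem.Str.len (d.getD (pvKey w) "")
      · rw [if_pos hlt, PySem.Dict.get?_insert, if_pos rfl, hv]
        rw [hgd, gt_iff_lt] at hlt
        show some w = if PySem.Str.len v < PySem.Str.len w then some w else some v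
        rw [if_pos hlt]
      · rw [if_neg hlt, hv]
        rw [hgd, gt_iff_lt] at hlt
        show (some v : Option String)
          = if PySem.Str.len v < PySem.Str.len w then some w else some v
        rw [if_neg hlt]
  · have hbeq : (pvKey w == c) = false := by simp [hk]
    rw [hbeq, if_neg (by simp)]
    unfold pvStepA
    split
    · rw [PySem.Dict.get?_insert, if_neg (fun h => hk h.symm)]
    · split
      · rw [PySem.Dict.get?_insert, if_neg (fun h => hk h.symm)]
      · rfl

theorem pvA_get? (l : List String) (d : PySem.Dict String String) (c : String) :
    (l.foldl pvStepA d).get? c =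
      (l.filter (fun w => pvKey w == c)).foldl pvOStep (d.get? c) := by
  induction l generalizing d with
  | nil => rfl
  | cons w l ih =>
      rw [List.foldl_cons, ih, List.filter_cons]
      by_cases hk : pvKey w == c
      · simp only [if_true, List.foldl_cons, pvStepA_get?, hk]
      · simp only [hk]
        rw [if_neg (by simp_all), pvStepA_get?]
        simp [hk]

theorem pvStepA_keys (d : PySem.Dict String String) (w : String) :
    (pvStepA d w).keys = PySem.Set.add d.keys (pvKey w) := by
  unfold pvStepA
  by_cases hc : d.contains (pvKey w) = false
  · rw [if_pos hc, PySem.Dict.keys_insert_of_not_contains d _ hc,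
      PySem.Set.add_of_not_mem (by
        intro hmem
        rw [← PySem.Dict.contains_iff_mem_keys] at hmem
        simp [hmem] at hc)]
  · have hc' : d.contains (pvKey w) = true := by cases h : d.contains (pvKey w) <;> simp_all
    have hmem : pvKey w ∈ d.keys := (PySem.Dict.contains_iff_mem_keys d _).mp hc'
    rw [if_neg hc]
    split
    · rw [PySem.Dict.keys_insert_of_contains d _ hc', PySem.Set.add_of_mem hmem]
    · rw [PySem.Set.add_of_mem hmem]

theorem pvA_keys (l : List String) (d : PySem.Dict String String) :
    (l.foldl pvStepA d).keys = PySem.Set.update d.keys (l.map pvKey) := by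
  induction l generalizing d with
  | nil => rfl
  | cons w l ih => rw [List.foldl_cons, ih, List.map_cons, PySem.Set.update_cons, pvStepA_keys]

theorem pvG_getD (l : List String) (d : PySem.Dict String (List String)) (c : String) :
    (l.foldl pvGroupStep d).getD c [] =
      d.getD c [] ++ l.filter (fun w => pvKey w == c) := by
  induction l generalizing d with
  | nil => simp
  | cons w l ih =>
      rw [List.foldl_cons, ih, List.filter_cons]
      unfold pvGroupStep
      rw [PySem.Dict.getD_modify]
      by_cases hk : pvKey w = c
      · simp [hk]
      · simp [hk, Ne.symm hk]

theorem pvG_keys (l : List String) :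
    (l.foldl pvGroupStep PySem.Dict.empty).keys = PySem.Set.ofList (l.map pvKey) := by
  have h := PySem.Dict.keys_foldl_modify_key l pvKey ([] : List String)
    (fun _ w => (· ++ [w])) PySem.Dict.empty
  simpa [pvGroupStep, PySem.Dict.keys_empty, PySem.Set.update_nil_left] using h

-- ===== VERDICT (by name: the statement is the Claim_ definition above) =====
theorem word_lenght_spec : Claim_equal_word_lenght := by
  intro phrases _ _
  unfold Spec_word_lenght word_lenght word_lenght_alt
  show (phrases.foldl pvStepA PySem.Dict.empty).items
    = ((phrases.foldl pvGroupStep PySem.Dict.empty).items.map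
        (fun p => (p.1, (PySem.List.max? p.2 PySem.Str.len).getD "")))
  have hKA : (phrases.foldl pvStepA PySem.Dict.empty).keys
      = PySem.Set.ofList (phrases.map pvKey) := by
    rw [pvA_keys, PySem.Dict.keys_empty, PySem.Set.update_nil_left]
  have hKG := pvG_keys phrases
  have hndA : (phrases.foldl pvStepA PySem.Dict.empty).keys.Nodup := by
    rw [hKA]; exact PySem.Set.nodup_ofList _
  have hndG : (phrases.foldl pvGroupStep PySem.Dict.empty).keys.Nodup := by
    rw [hKG]; exact PySem.Set.nodup_ofList _
  rw [PySem.Dict.items_eq_map_keys _ hndA "",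
    PySem.Dict.items_eq_map_keys _ hndG ([] : List String), hKA, hKG, List.map_map]
  apply List.map_congr_left
  intro k _
  simp only [Function.comp_apply]
  congr 1
  rw [PySem.Dict.getD_eq_get?_getD, pvA_get?, PySem.Dict.get?_empty,
    pvG_getD, PySem.Dict.getD_empty, List.nil_append, pvMax?_eq_foldl]
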